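-- pv_equiv track=rewrite | github.com/mikkomaa/advent-of-code-2020 | src/day05_1.py | convert_partitioning
-- ===== SOURCE A (Python) =====
-- def convert_partitioning(string):
--     """Return the integer converted from space partitioning string."""
--     low = 0
--     high = 2 ** len(string) - 1
--     for c in string:
--         if c in 'FL':
--             high = (low + high) // 2
--         else:  # c in 'BR'
--             low = (low + high) // 2 + 1
--     return low
-- ===== SOURCE B (Python) =====
-- def convert_partitioning(string):
--     """Return the integer converted from space partitioning string."""
--     result = 0
--     for c in string:
--         result = result * 2 + (0 if c in 'FL' else 1)
--     return result
-- ===== Notes on version B (the rewrite author's own statement) =====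
-- stated objective: simpler
-- what changed: B accumulates the value directly as a binary number (result = result*2 + bit per character) instead of A's bisection of the interval [low, high]; A's high starts at 2**len(string)-1, so A does floor-divisions on huge big-ints while B only ever holds the final-sized accumulator.
import Mathlib
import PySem

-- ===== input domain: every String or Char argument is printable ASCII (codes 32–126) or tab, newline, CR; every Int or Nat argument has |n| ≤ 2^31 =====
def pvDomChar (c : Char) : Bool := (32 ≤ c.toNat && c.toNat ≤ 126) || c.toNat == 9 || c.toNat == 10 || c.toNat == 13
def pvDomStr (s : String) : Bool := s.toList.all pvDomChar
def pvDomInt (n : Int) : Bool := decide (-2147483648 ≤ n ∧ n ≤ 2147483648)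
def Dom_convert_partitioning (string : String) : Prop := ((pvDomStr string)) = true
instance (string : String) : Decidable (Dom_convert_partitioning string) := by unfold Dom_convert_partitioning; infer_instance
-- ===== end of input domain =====

-- B replaces A's interval bisection by directly accumulating the binary number; objective: simpler.

-- ===== PORT A =====
-- the for-loop over the string, carrying (low, high); `c in 'FL'` is exactly c = 'F' ∨ c = 'L'
def pvA_loop : List Char → Int × Int → Int × Int
  | [], s => s
  | c :: cs, (low, high) =>
    if c = 'F' ∨ c = 'L' then
      pvA_loop cs (low, PySem.Int.floordiv (low + high) 2)
    else
      pvA_loop cs (PySem.Int.floordiv (low + high) 2 + 1, high)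

def convert_partitioning (string : String) : Int :=
  (pvA_loop string.toList (0, 2 ^ string.toList.length - 1)).1

-- ===== PORT B =====
def pvB_loop : List Char → Int → Int
  | [], acc => acc
  | c :: cs, acc => pvB_loop cs (acc * 2 + (if c = 'F' ∨ c = 'L' then 0 else 1))

def convert_partitioning_alt (string : String) : Int :=
  pvB_loop string.toList 0

-- ===== PRECONDITION & SPEC =====
def Spec_convert_partitioning (string : String) (out : Int) : Prop := out = convert_partitioning_alt string
instance (string : String) (out : Int) : Decidable (Spec_convert_partitioning string out) := by unfold Spec_convert_partitioning; infer_instance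

-- ===== CLAIM (what is proved, stated in full; the proofs are below) =====
def Claim_equal_convert_partitioning : Prop := ∀ (string : String), Dom_convert_partitioning string → Spec_convert_partitioning string (convert_partitioning string)

-- ===== LEMMAS AND PROOFS =====

theorem pvB_loop_shift (cs : List Char) : ∀ a : Int, pvB_loop cs a = a * 2 ^ cs.length + pvB_loop cs 0 := by
  induction cs with
  | nil => intro a; simp [pvB_loop]
  | cons c cs ih =>
    intro a
    simp only [pvB_loop, List.length_cons]
    rw [ih (a * 2 + _), ih (0 * 2 + _)]
    ring

-- invariant: starting from high = low + 2^|cs| - 1, A's final low is low + (value B computes)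
theorem pvA_loop_inv (cs : List Char) : ∀ low : Int,
    (pvA_loop cs (low, low + 2 ^ cs.length - 1)).1 = low + pvB_loop cs 0 := by
  induction cs with
  | nil => intro low; simp [pvA_loop, pvB_loop]
  | cons c cs ih =>
    intro low
    have h2 : (0 : Int) < 2 := by norm_num
    have hmid : PySem.Int.floordiv (low + (low + 2 ^ (c :: cs).length - 1)) 2
        = low + 2 ^ cs.length - 1 := by
      rw [PySem.Int.floordiv_eq_ediv_of_pos h2]
      have : (2 : Int) ^ (c :: cs).length = 2 * 2 ^ cs.length := by
        rw [List.length_cons, pow_succ]; ring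
      rw [this]
      omega
    by_cases hc : c = 'F' ∨ c = 'L'
    · simp only [pvA_loop, pvB_loop, hc, if_pos]
      rw [hmid, ih low]
      simp
    · simp only [pvA_loop, pvB_loop, hc, if_neg, not_false_iff]
      rw [hmid]
      have harg : low + 2 ^ cs.length - 1 + 1 = low + 2 ^ cs.length := by ring
      have hhigh : low + 2 ^ (c :: cs).length - 1
          = (low + 2 ^ cs.length) + 2 ^ cs.length - 1 := by
        rw [List.length_cons, pow_succ]; ring
      rw [harg, hhigh, ih (low + 2 ^ cs.length)]
      rw [pvB_loop_shift cs (0 * 2 + 1)]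
      ring

-- ===== VERDICT (by name: the statement is the Claim_ definition above) =====
theorem convert_partitioning_spec : Claim_equal_convert_partitioning := by
  intro s _
  unfold Spec_convert_partitioning convert_partitioning convert_partitioning_alt
  have := pvA_loop_inv s.toList 0
  simpa using this
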